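-- pv_equiv track=rewrite | github.com/JIYANG-PLUS/ustjson | CleanTools/_Combine.py | _clear_series_single_list
-- ===== SOURCE A (Python) =====
-- from typing import List
--
-- def _clear_series_single_list(split_str: List[str], join_str: str=' '):
--     """以拆分后的列表形式进行合并离散单一值的清理，这是本模块其它函数的共用功能模块化实现。
--
--     split_str: 以某种标准拆分后的字符串列表。
--     join_str: 用于重新连接的字符。
--     return: 处理后的字符串。
--     """
--     len_split_str = len( split_str )
--     flag_single = [ len(x)==1 for x in split_str ] # 布尔值标记是否为单
--     i = 0
--     while i < len_split_str-1:
--         if flag_single[i]: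
--             j = i
--             if flag_single[i+1]:
--                 j -= 1 # 表示i现在的位置即这里的j依旧为单一值，配合后面的i+=1达到效果。
--             split_str[i] = split_str[i]+split_str[i+1]
--             split_str.pop( i+1 )
--             flag_single.pop( i+1 )
--             len_split_str -= 1
--             i = j
--         i += 1
--     return join_str.join( split_str )
-- ===== SOURCE B (Python) =====
-- from typing import List
--
-- def _clear_series_single_list(split_str: List[str], join_str: str=' '):
--     """Single left-to-right pass: a maximal run of single-character tokens is
--     concatenated together with the one token that follows it (if any).
--     Unlike A, this does not mutate split_str in place."""
--     out = []
--     buf = None  # pending concatenation started by single-char tokens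
--     for tok in split_str:
--         if buf is not None:
--             buf += tok
--             if len(tok) != 1:
--                 out.append(buf)
--                 buf = None
--         elif len(tok) == 1:
--             buf = tok
--         else:
--             out.append(tok)
--     if buf is not None:
--         out.append(buf)
--     return join_str.join(out)
-- ===== Notes on version B (the rewrite author's own statement) =====
-- stated objective: alternative
-- what changed: Replaced the index-rewinding while loop that repeatedly pops from the mutated list with a single left-to-right pass that accumulates a pending buffer of merged single-char tokens into a fresh output list; B does not mutate split_str.
import Mathlib
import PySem

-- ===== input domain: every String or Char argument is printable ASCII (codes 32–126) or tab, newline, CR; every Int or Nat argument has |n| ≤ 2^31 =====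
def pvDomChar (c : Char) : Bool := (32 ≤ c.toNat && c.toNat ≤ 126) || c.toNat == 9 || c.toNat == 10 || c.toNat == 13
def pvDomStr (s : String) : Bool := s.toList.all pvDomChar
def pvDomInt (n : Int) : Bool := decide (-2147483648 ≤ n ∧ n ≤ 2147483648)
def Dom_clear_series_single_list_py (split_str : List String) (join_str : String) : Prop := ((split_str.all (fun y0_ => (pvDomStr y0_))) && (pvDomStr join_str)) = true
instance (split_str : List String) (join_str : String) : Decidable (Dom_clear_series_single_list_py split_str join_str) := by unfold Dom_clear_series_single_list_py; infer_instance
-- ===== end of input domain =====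

-- B replaces A's index-rewinding while loop with in-place pops by a single left-to-right pass with a
-- pending buffer over a fresh output list. Equivalence is about the RETURN value only: A mutates
-- split_str in place, B does not.


-- ===== PORT A =====
-- the while loop: state = (split_str, flag_single, i); each branch mirrors A's mutations
-- (split_str[i] = split_str[i]+split_str[i+1]; pop(i+1); flag_single.pop(i+1); i = j; i += 1);
-- after the single/single merge i = (i-1)+1 = i, after single/non-single i = i+1
def pvALoop (ss : List String) (fl : List Bool) (i : Nat) : List String :=
  if _h : i + 1 < ss.length then
    if fl.getD i false then
      let merged := (ss.getD i "") ++ (ss.getD (i+1) "")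
      let ss' := (ss.set i merged).eraseIdx (i+1)
      let fl' := fl.eraseIdx (i+1)
      if fl.getD (i+1) false then
        pvALoop ss' fl' i
      else
        pvALoop ss' fl' (i+1)
    else
      pvALoop ss fl (i+1)
  else ss
termination_by ss.length - i
decreasing_by
  all_goals first
    | (rw [List.length_eraseIdx_of_lt (by rw [List.length_set]; omega), List.length_set]; omega)
    | omega


def clear_series_single_list_py (split_str : List String) (join_str : String) : String :=
  PySem.Str.join join_str
    (pvALoop split_str (split_str.map (fun x => PySem.Str.len x == 1)) 0)

-- ===== PORT B =====
-- single pass: buf is the pending concatenation started by single-char tokens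
def pvBLoop : List String → Option String → List String
  | [], none => []
  | [], some b => [b]
  | t :: ts, some b =>
      let b' := b ++ t
      if PySem.Str.len t == 1 then pvBLoop ts (some b')
      else b' :: pvBLoop ts none
  | t :: ts, none =>
      if PySem.Str.len t == 1 then pvBLoop ts (some t)
      else t :: pvBLoop ts none


def clear_series_single_list_py_alt (split_str : List String) (join_str : String) : String :=
  PySem.Str.join join_str (pvBLoop split_str none)

-- ===== PRECONDITION & SPEC =====
def Spec_clear_series_single_list_py (split_str : List String) (join_str : String) (out : String) : Prop := out = clear_series_single_list_py_alt split_str join_str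
instance (split_str : List String) (join_str : String) (out : String) : Decidable (Spec_clear_series_single_list_py split_str join_str out) := by unfold Spec_clear_series_single_list_py; infer_instance

-- ===== CLAIM (what is proved, stated in full; the proofs are below) =====
def Claim_equal_clear_series_single_list_py : Prop := ∀ (split_str : List String) (join_str : String), Dom_clear_series_single_list_py split_str join_str → Spec_clear_series_single_list_py split_str join_str (clear_series_single_list_py split_str join_str)

-- ===== LEMMAS AND PROOFS =====
def pvIsS (x : String) : Bool := PySem.Str.len x == 1

theorem pvIsS_true {t : String} (h : t.length = 1) : pvIsS t = true := by
  simp [pvIsS, PySem.Str.len, h]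
theorem pvIsS_false {t : String} (h : ¬ t.length = 1) : pvIsS t = false := by
  simp [pvIsS, PySem.Str.len]; omega

theorem pvGetD_app1 {α : Type} (pre : List α) (x : α) (r : List α) (d : α) :
    (pre ++ x :: r).getD pre.length d = x := by
  induction pre with
  | nil => rfl
  | cons h t ih => simpa using ih

theorem pvGetD_app2 {α : Type} (pre : List α) (x y : α) (r : List α) (d : α) :
    (pre ++ x :: y :: r).getD (pre.length + 1) d = y := by
  induction pre with
  | nil => rfl
  | cons h t ih => simpa using ih

theorem pvSet_app (pre : List String) (x v : String) (r : List String) :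
    (pre ++ x :: r).set pre.length v = pre ++ v :: r := by
  induction pre with
  | nil => rfl
  | cons h t ih => simpa using ih

theorem pvErase_app {α : Type} (pre : List α) (x y : α) (r : List α) :
    (pre ++ x :: y :: r).eraseIdx (pre.length + 1) = pre ++ x :: r := by
  induction pre with
  | nil => rfl
  | cons h t ih => simpa using ih

theorem pvLoopInv (n : Nat) :
    (∀ rest pre (preFl : List Bool), rest.length = n → preFl.length = pre.length →
      pvALoop (pre ++ rest) (preFl ++ rest.map pvIsS) pre.length = pre ++ pvBLoop rest none)
    ∧
    (∀ rest pre (preFl : List Bool) b, rest.length = n → preFl.length = pre.length →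
      pvALoop (pre ++ b :: rest) (preFl ++ true :: rest.map pvIsS) pre.length
        = pre ++ pvBLoop rest (some b)) := by
  induction n using Nat.strong_induction_on with
  | _ n ih =>
    constructor
    · intro rest pre preFl hn hl
      match rest, hn with
      | [], _ =>
        rw [pvALoop, dif_neg (by simp)]; simp [pvBLoop]
      | [t], _ =>
        rw [pvALoop, dif_neg (by simp), show pvBLoop [t] none = [t] from by
          unfold pvBLoop; split <;> rfl]
      | t :: u :: rest', hn =>
        rw [pvALoop, dif_pos (by simp)]
        have h0 : (preFl ++ (t :: u :: rest').map pvIsS).getD pre.length false = pvIsS t := by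
          simpa [hl] using pvGetD_app1 preFl (pvIsS t) ((u :: rest').map pvIsS) false
        have h1 : (preFl ++ (t :: u :: rest').map pvIsS).getD (pre.length + 1) false = pvIsS u := by
          simpa [hl] using pvGetD_app2 preFl (pvIsS t) (pvIsS u) (rest'.map pvIsS) false
        rw [h0, h1]
        by_cases hst : t.length = 1
        · rw [if_pos (pvIsS_true hst)]
          have hget0 : (pre ++ t :: u :: rest').getD pre.length "" = t := pvGetD_app1 ..
          have hget1 : (pre ++ t :: u :: rest').getD (pre.length + 1) "" = u := pvGetD_app2 ..
          have hset : ((pre ++ t :: u :: rest').set pre.length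
              ((pre ++ t :: u :: rest').getD pre.length "" ++ (pre ++ t :: u :: rest').getD (pre.length+1) "")).eraseIdx (pre.length + 1)
              = pre ++ (t ++ u) :: rest' := by
            rw [hget0, hget1, pvSet_app, pvErase_app]
          have hfl : (preFl ++ (t :: u :: rest').map pvIsS).eraseIdx (pre.length + 1)
              = preFl ++ pvIsS t :: rest'.map pvIsS := by
            have := pvErase_app preFl (pvIsS t) (pvIsS u) (rest'.map pvIsS)
            simpa [hl] using this
          rw [hfl, pvIsS_true hst] at *
          by_cases hsu : u.length = 1
          · rw [if_pos (pvIsS_true hsu), hset]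
            have := (ih rest'.length (by simp at hn; omega)).2 rest' pre preFl (t ++ u) rfl hl
            rw [this]
            simp [pvBLoop, PySem.Str.len, hst, hsu]
          · rw [if_neg (by rw [pvIsS_false hsu]; simp), hset]
            have := (ih rest'.length (by simp at hn; omega)).1 rest' (pre ++ [t ++ u]) (preFl ++ [true]) rfl (by simp [hl])
            simp only [List.append_assoc, List.singleton_append, List.length_append,
              List.length_cons, List.length_nil] at this
            rw [show pre.length + (0+1) = pre.length + 1 from by omega] at this
            rw [this]
            have hst' : (PySem.Str.len t == 1) = true := by
              have h2 := pvIsS_true hst; simpa [pvIsS] using h2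
            have hsu' : ¬ ((PySem.Str.len u == 1) = true) := by
              have h2 := pvIsS_false hsu; simp [pvIsS] at h2; simp [h2]
            conv_rhs => rw [pvBLoop]
            rw [if_pos hst']
            conv_rhs => rw [pvBLoop]
            simp only [if_neg hsu']
        · rw [if_neg (by rw [pvIsS_false hst]; simp)]
          have := (ih (u :: rest').length (by simp at hn ⊢; omega)).1 (u :: rest') (pre ++ [t]) (preFl ++ [pvIsS t]) rfl (by simp [hl])
          simp only [List.append_assoc, List.singleton_append, List.length_append,
            List.length_cons, List.length_nil] at this
          rw [show pre.length + (0+1) = pre.length + 1 from by omega] at this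
          simp only [List.map_cons] at this ⊢
          rw [this]
          have hst' : ¬ ((PySem.Str.len t == 1) = true) := by
            have := pvIsS_false hst; simp [pvIsS] at this; simp [this]
          conv_rhs => rw [pvBLoop]
          rw [if_neg hst']
    · intro rest pre preFl b hn hl
      match rest, hn with
      | [], _ =>
        rw [pvALoop, dif_neg (by simp)]; simp [pvBLoop]
      | u :: rest', hn =>
        rw [pvALoop, dif_pos (by simp)]
        have h0 : (preFl ++ true :: (u :: rest').map pvIsS).getD pre.length false = true := by
          simpa [hl] using pvGetD_app1 preFl true ((u :: rest').map pvIsS) false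
        have h1 : (preFl ++ true :: (u :: rest').map pvIsS).getD (pre.length + 1) false = pvIsS u := by
          simpa [hl] using pvGetD_app2 preFl true (pvIsS u) (rest'.map pvIsS) false
        rw [h0, h1, if_pos rfl]
        have hget0 : (pre ++ b :: u :: rest').getD pre.length "" = b := pvGetD_app1 ..
        have hget1 : (pre ++ b :: u :: rest').getD (pre.length + 1) "" = u := pvGetD_app2 ..
        have hset : ((pre ++ b :: u :: rest').set pre.length
            ((pre ++ b :: u :: rest').getD pre.length "" ++ (pre ++ b :: u :: rest').getD (pre.length+1) "")).eraseIdx (pre.length + 1)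
            = pre ++ (b ++ u) :: rest' := by
          rw [hget0, hget1, pvSet_app, pvErase_app]
        have hfl : (preFl ++ true :: (u :: rest').map pvIsS).eraseIdx (pre.length + 1)
            = preFl ++ true :: rest'.map pvIsS := by
          have := pvErase_app preFl true (pvIsS u) (rest'.map pvIsS)
          simpa [hl] using this
        by_cases hsu : u.length = 1
        · rw [if_pos (pvIsS_true hsu), hset, hfl]
          have := (ih rest'.length (by simp at hn; omega)).2 rest' pre preFl (b ++ u) rfl hl
          rw [this]
          simp [pvBLoop, PySem.Str.len, hsu]
        · rw [if_neg (by rw [pvIsS_false hsu]; simp), hset, hfl]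
          have := (ih rest'.length (by simp at hn; omega)).1 rest' (pre ++ [b ++ u]) (preFl ++ [true]) rfl (by simp [hl])
          simp only [List.append_assoc, List.singleton_append, List.length_append,
            List.length_cons, List.length_nil] at this
          rw [show pre.length + (0+1) = pre.length + 1 from by omega] at this
          rw [this]
          have hsu' : ¬ ((PySem.Str.len u == 1) = true) := by
            have := pvIsS_false hsu; simp [pvIsS] at this; simp [this]
          conv_rhs => rw [pvBLoop]
          rw [if_neg hsu']

-- ===== VERDICT (by name: the statement is the Claim_ definition above) =====
theorem clear_series_single_list_py_spec : Claim_equal_clear_series_single_list_py := by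
  intro split_str join_str _
  unfold Spec_clear_series_single_list_py clear_series_single_list_py clear_series_single_list_py_alt
  have h := (pvLoopInv split_str.length).1 split_str [] [] rfl rfl
  simp only [List.nil_append, List.length_nil] at h
  rw [show (fun x : String => PySem.Str.len x == 1) = pvIsS from rfl, h]
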